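-- pv_equiv track=rewrite | github.com/YundaeLeeSong/ydjs-coding-javalin | _ap_quiz_02.py | mergeTwo
-- ===== SOURCE A (Python) =====
-- def mergeTwo(a: list[str], b: list[str], n: int) -> list[str]:
--     """
--     Description:
--         Start with two arrays of strings, `a` and `b`, each sorted
--         alphabetically and without duplicates.
--         Return a new list containing the first `n` elements from the
--         two arrays merged together.
--         The result list should be in alphabetical order and
--         without duplicates.
--         You should make a single pass over `a` and `b`, taking
--         advantage of their sorted order.
--
--     Examples:
--         mergeTwo(["a", "c", "z"], ["b", "f", "z"], 3) -> ["a", "b", "c"]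
--         mergeTwo(["a", "c", "z"], ["c", "f", "z"], 3) -> ["a", "c", "f"]
--         mergeTwo(["f", "g", "z"], ["c", "f", "g"], 3) -> ["c", "f", "g"]
--
--     Instructions to run the tests via the CLI:
--         1. Open your terminal or command prompt.
--         2. Run the tests by executing: `python async-ap/q20.py`
--
--     Args:
--         a (list[str]): First sorted list of unique strings.
--         b (list[str]): Second sorted list of unique strings.
--         n (int): Number of elements to include in the merged result.
--
--     Returns:
--         list[str]: A sorted list of the first `n` unique strings from merging `a` and `b`.
--     """
--     def quicksort(arr: list[str]) -> list[str]:
--         if len(arr) <= 1: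
--             return arr
--         pivot = arr[len(arr) // 2]
--         left = [x for x in arr if x < pivot]
--         middle = [x for x in arr if x == pivot]
--         right = [x for x in arr if x > pivot]
--         return quicksort(left) + middle + quicksort(right)
--     ### [Your Implementation Here]
--     c = a + b
--     c = quicksort(c) # n log n
--     unique_c = [c[0]] # O(1)
--     for i in range(1, len(c) - 1): # O(n)
--         if (len(unique_c) == n):
--             break
--         if (c[i] != unique_c[-1]):
--             unique_c.append(c[i])
--     return unique_c
-- ===== SOURCE B (Python) =====
-- def mergeTwo(a: list[str], b: list[str], n: int) -> list[str]:
--     # Built-in sort instead of a hand-written quicksort; then one dedup pass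
--     # over the interior slice, stopping once n elements are collected.
--     c = sorted(a + b)
--     out = [c[0]]
--     for x in c[1:-1]:
--         if len(out) == n:
--             break
--         if x != out[-1]:
--             out.append(x)
--     return out
-- ===== Notes on version B (the rewrite author's own statement) =====
-- stated objective: faster
-- what changed: Replaces A's hand-written recursive three-way quicksort (list-comprehension partitions) by the built-in sort, and runs the dedup loop directly over the slice c[1:-1] instead of indexing c over range(1, len(c)-1); Pre_ excludes only a = b = [], where A raises IndexError.
import Mathlib
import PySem

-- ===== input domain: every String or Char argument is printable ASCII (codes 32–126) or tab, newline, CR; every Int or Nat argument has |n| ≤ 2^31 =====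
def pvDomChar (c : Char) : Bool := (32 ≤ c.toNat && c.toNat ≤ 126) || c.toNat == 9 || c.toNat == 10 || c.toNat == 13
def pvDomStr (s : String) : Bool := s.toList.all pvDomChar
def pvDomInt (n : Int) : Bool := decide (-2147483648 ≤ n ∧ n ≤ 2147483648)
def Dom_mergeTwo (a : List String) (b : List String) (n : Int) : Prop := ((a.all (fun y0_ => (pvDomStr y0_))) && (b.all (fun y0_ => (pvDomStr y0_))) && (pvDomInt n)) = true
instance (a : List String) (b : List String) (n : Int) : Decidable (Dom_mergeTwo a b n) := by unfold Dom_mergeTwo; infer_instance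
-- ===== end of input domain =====

-- B replaces A's hand-written recursive quicksort by the built-in sort and runs the dedup
-- loop directly over the slice c[1:-1] instead of over an index range; same return value
-- wherever A returns (Pre_ excludes only a = b = [], where A raises IndexError).

-- ===== PORT A =====
-- pivot = arr[len(arr) // 2] is a member of arr (used by the termination proof of pvQuicksort)
theorem pvPivot_mem (arr : List String) (h : ¬ arr.length ≤ 1) :
    (PySem.List.pyGet? arr (PySem.Int.floordiv (arr.length : Int) 2)).getD "" ∈ arr := by
  have h2 : PySem.Int.floordiv (arr.length : Int) 2 = ((arr.length / 2 : Nat) : Int) := by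
    exact_mod_cast PySem.Int.floordiv_natCast arr.length 2
  have hlt : arr.length / 2 < arr.length := Nat.div_lt_self (by omega) (by omega)
  rw [h2, PySem.List.pyGet?_natCast]
  simp [List.getElem?_eq_getElem hlt]

def pvQuicksort (arr : List String) : List String :=
  if h : arr.length ≤ 1 then arr
  else
    let pivot := (PySem.List.pyGet? arr (PySem.Int.floordiv (arr.length : Int) 2)).getD ""
    let left := arr.filter (fun x => decide (x < pivot))
    let middle := arr.filter (fun x => x == pivot)
    let right := arr.filter (fun x => decide (pivot < x))
    pvQuicksort left ++ middle ++ pvQuicksort right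
termination_by arr.length
decreasing_by
  all_goals
    simp_wf
    rw [show arr.length = arr.attach.length from (List.length_attach (l := arr)).symm]
    apply List.length_filter_lt_length_iff_exists.2
    refine ⟨⟨_, pvPivot_mem arr h⟩, List.mem_attach _ _, ?_⟩
    simp [PySem.Int.floordiv_eq_ediv_of_pos]

-- the for-loop with its break, over the index list of range(1, len(c)-1)
def pvLoopA (c : List String) (n : Int) : List String → List Int → List String
  | acc, [] => acc
  | acc, i :: is =>
    if (acc.length : Int) = n then acc
    else
      let ci := (PySem.List.pyGet? c i).getD ""
      if ci ≠ acc.getLastD "" then pvLoopA c n (acc ++ [ci]) is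
      else pvLoopA c n acc is

def mergeTwo (a : List String) (b : List String) (n : Int) : List String :=
  let c := pvQuicksort (a ++ b)
  let uc := [(PySem.List.pyGet? c 0).getD ""]
  pvLoopA c n uc (PySem.List.pyRange 1 ((c.length : Int) - 1) 1)

-- ===== PORT B =====
-- for x in c[1:-1]: break when len(out) == n; append x when it differs from out[-1]
def pvLoopB (n : Int) : List String → List String → List String
  | acc, [] => acc
  | acc, x :: xs =>
    if (acc.length : Int) = n then acc
    else if x ≠ acc.getLastD "" then pvLoopB n (acc ++ [x]) xs
    else pvLoopB n acc xs

def mergeTwo_alt (a : List String) (b : List String) (n : Int) : List String :=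
  let c := PySem.List.sorted (a ++ b) (fun x => x) false
  pvLoopB n [(PySem.List.pyGet? c 0).getD ""] (PySem.List.slice c (some 1) (some (-1)))

-- ===== PRECONDITION & SPEC =====
-- Pre_ excludes exactly the inputs where A raises IndexError (c[0] on the empty concatenation)
def Pre_mergeTwo (a : List String) (b : List String) (n : Int) : Prop := a ++ b ≠ []
instance (a : List String) (b : List String) (n : Int) : Decidable (Pre_mergeTwo a b n) := by
  unfold Pre_mergeTwo; infer_instance
def pvWitness_mergeTwo : List String × List String × Int := (["a", "c"], ["b"], 2)

def Spec_mergeTwo (a : List String) (b : List String) (n : Int) (out : List String) : Prop := out = mergeTwo_alt a b n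
instance (a : List String) (b : List String) (n : Int) (out : List String) : Decidable (Spec_mergeTwo a b n out) := by unfold Spec_mergeTwo; infer_instance

-- ===== CLAIM (what is proved, stated in full; the proofs are below) =====
def Claim_equal_mergeTwo : Prop := ∀ (a : List String) (b : List String) (n : Int), Dom_mergeTwo a b n → Pre_mergeTwo a b n → Spec_mergeTwo a b n (mergeTwo a b n)

-- ===== LEMMAS AND PROOFS =====

theorem qs_perm (arr : List String) : (pvQuicksort arr).Perm arr := by
  rw [pvQuicksort]
  split
  · exact List.Perm.refl _
  · rename_i h
    have hl := qs_perm (arr.filter (fun x => decide (x < (PySem.List.pyGet? arr (PySem.Int.floordiv (arr.length : Int) 2)).getD "")))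
    have hr := qs_perm (arr.filter (fun x => decide ((PySem.List.pyGet? arr (PySem.Int.floordiv (arr.length : Int) 2)).getD "" < x)))
    set p := (PySem.List.pyGet? arr (PySem.Int.floordiv (arr.length : Int) 2)).getD "" with hp
    have h1 : arr.filter (fun x => x == p)
        = (arr.filter (fun x => !decide (x < p))).filter (fun x => x == p) := by
      rw [List.filter_filter]; apply (List.filter_congr ?_).symm; intro x _
      by_cases hx : x = p <;> simp [hx]
    have h2 : arr.filter (fun x => decide (p < x))
        = (arr.filter (fun x => !decide (x < p))).filter (fun x => !(x == p)) := by
      rw [List.filter_filter]; apply (List.filter_congr ?_).symm; intro x _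
      rcases lt_trichotomy x p with hc|hc|hc
      · simp [hc, not_lt_of_gt hc]
      · simp [hc]
      · simp [hc, not_lt_of_gt hc, (ne_of_gt hc)]
    have hmr : (arr.filter (fun x => x == p) ++ arr.filter (fun x => decide (p < x))).Perm
        (arr.filter (fun x => !decide (x < p))) := by
      rw [h1, h2]; exact List.filter_append_perm _ _
    rw [List.append_assoc]
    exact (hl.append ((List.Perm.refl _).append hr)).trans
      ((List.Perm.append_left _ hmr).trans (List.filter_append_perm _ _))
termination_by arr.length
decreasing_by
  · exact List.length_filter_lt_length_iff_exists.2 ⟨_, pvPivot_mem arr (by assumption), by simp⟩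
  · exact List.length_filter_lt_length_iff_exists.2 ⟨_, pvPivot_mem arr (by assumption), by simp⟩

theorem qs_sorted (arr : List String) : (pvQuicksort arr).Pairwise (· ≤ ·) := by
  rw [pvQuicksort]
  split
  · rename_i h
    match arr, h with
    | [], _ => exact List.Pairwise.nil
    | [x], _ => simp
  · rename_i h
    have ihl := qs_sorted (arr.filter (fun x => decide (x < (PySem.List.pyGet? arr (PySem.Int.floordiv (arr.length : Int) 2)).getD "")))
    have ihr := qs_sorted (arr.filter (fun x => decide ((PySem.List.pyGet? arr (PySem.Int.floordiv (arr.length : Int) 2)).getD "" < x)))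
    set p := (PySem.List.pyGet? arr (PySem.Int.floordiv (arr.length : Int) 2)).getD "" with hp
    have hmemL : ∀ x ∈ pvQuicksort (arr.filter (fun x => decide (x < p))), x < p := by
      intro x hx
      have := (qs_perm _).mem_iff.1 hx
      simpa using (List.mem_filter.1 this).2
    have hmemR : ∀ x ∈ pvQuicksort (arr.filter (fun x => decide (p < x))), p < x := by
      intro x hx
      have := (qs_perm _).mem_iff.1 hx
      simpa using (List.mem_filter.1 this).2
    have hmemM : ∀ x ∈ arr.filter (fun x => x == p), x = p := by
      intro x hx
      simpa using (List.mem_filter.1 hx).2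
    refine List.pairwise_append.2 ⟨List.pairwise_append.2 ⟨ihl, ?_, ?_⟩, ihr, ?_⟩
    · exact List.pairwise_of_forall_mem_list (fun a ha b hb => by rw [hmemM a ha, hmemM b hb])
    · intro a ha b hb
      exact le_of_lt (lt_of_lt_of_le (hmemL a ha) (le_of_eq (hmemM b hb).symm))
    · intro a ha b hb
      rcases List.mem_append.1 ha with ha' | ha'
      · exact le_of_lt (lt_trans (hmemL a ha') (hmemR b hb))
      · exact le_of_lt (lt_of_le_of_lt (le_of_eq (hmemM a ha')) (hmemR b hb))
termination_by arr.length
decreasing_by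
  · exact List.length_filter_lt_length_iff_exists.2 ⟨_, pvPivot_mem arr (by assumption), by simp⟩
  · exact List.length_filter_lt_length_iff_exists.2 ⟨_, pvPivot_mem arr (by assumption), by simp⟩

theorem qs_eq_sorted (arr : List String) :
    pvQuicksort arr = PySem.List.sorted arr (fun x => x) false :=
  (PySem.List.sorted_id_eq_of_perm_of_pairwise _ _ (qs_perm arr) (qs_sorted arr)).symm

theorem loopA_eq_loopB (cs : List String) (n : Int) (k : Nat) (acc : List String) :
    pvLoopA cs n acc (PySem.List.pyRange (k : Int) ((cs.length : Int) - 1) 1)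
      = pvLoopB n acc ((cs.drop k).dropLast) := by
  by_cases hk : (k : Int) < (cs.length : Int) - 1
  · have hkn : k + 1 < cs.length := by omega
    have hklt : k < cs.length := by omega
    rw [PySem.List.pyRange_one_cons hk]
    obtain ⟨x, t, hdt⟩ : ∃ x t, cs.drop k = x :: t := ⟨_, _, List.drop_eq_getElem_cons hklt⟩
    have hxt : cs.drop (k+1) = t := by
      have := List.drop_drop (i := 1) (j := k) (l := cs)
      rw [hdt] at this
      simpa [Nat.add_comm] using this.symm
    have hget : PySem.List.pyGet? cs (k : Int) = some x := by
      rw [PySem.List.pyGet?_natCast]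
      have h0 : (cs.drop k)[0]? = cs[k]? := by
        rw [List.getElem?_drop]
        simp
      rw [hdt] at h0
      rw [← h0]
      simp
    have htne : t ≠ [] := by
      rw [← hxt]
      intro hnil
      have := congrArg List.length hnil
      rw [List.length_drop] at this
      simp at this
      omega
    rw [hdt, List.dropLast_cons_of_ne_nil htne]
    simp only [pvLoopA, pvLoopB, hget, Option.getD_some]
    have hcast : ((k : Int) + 1) = (((k + 1 : Nat)) : Int) := by push_cast; ring
    split_ifs with h1 h2
    · rfl
    · rw [hcast, loopA_eq_loopB cs n (k+1) (acc ++ [x]), hxt]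
    · rw [hcast, loopA_eq_loopB cs n (k+1) acc, hxt]
  · have h1 : PySem.List.pyRange (k : Int) ((cs.length : Int) - 1) 1 = [] :=
      PySem.List.pyRange_one_eq_nil (by omega)
    have h2 : (cs.drop k).dropLast = [] := by
      apply List.eq_nil_of_length_eq_zero
      rw [List.length_dropLast, List.length_drop]
      omega
    rw [h1, h2]
    rfl
termination_by cs.length - k
decreasing_by all_goals omega

-- c[1:-1] is the interior of the list: drop the head, then the last element
theorem slice_one_neg_one (c0 : String) (t : List String) :
    PySem.List.slice (c0 :: t) (some 1) (some (-1)) = t.dropLast := by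
  simp [PySem.List.slice, List.dropLast_eq_take]

-- ===== VERDICT (by name: the statement is the Claim_ definition above) =====
theorem mergeTwo_spec : Claim_equal_mergeTwo := by
  intro a b n _hdom hpre
  unfold Pre_mergeTwo at hpre
  unfold Spec_mergeTwo
  simp only [mergeTwo, mergeTwo_alt]
  rw [qs_eq_sorted]
  have hsne : PySem.List.sorted (a ++ b) (fun x => x) false ≠ [] := by
    rw [Ne, PySem.List.sorted_eq_nil_iff]; exact hpre
  obtain ⟨c0, t, hct⟩ := List.exists_cons_of_ne_nil hsne
  rw [hct]
  rw [show pvLoopA (c0 :: t) n [(PySem.List.pyGet? (c0 :: t) 0).getD ""]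
        (PySem.List.pyRange 1 (((c0 :: t).length : Int) - 1) 1)
      = pvLoopB n [(PySem.List.pyGet? (c0 :: t) 0).getD ""] (((c0 :: t).drop 1).dropLast) by
    simpa using loopA_eq_loopB (c0 :: t) n 1 [(PySem.List.pyGet? (c0 :: t) 0).getD ""]]
  rw [slice_one_neg_one]
  rfl
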